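-- pv_equiv track=rewrite | github.com/i3rotlher/Projekt | coin_identifier.py | find_closest_width
-- ===== SOURCE A (Python) =====
-- coin_widths = {"2€": 129, "1€": 113, "50ct": 118, "20ct": 103, "10ct":95, "5ct": 97, "2ct": 90, "1ct": 80}
--
-- def find_closest_width(number):
--     differences = {}
--
--     for key, value in coin_widths.items():
--         diff = abs(number - value)
--         differences[key] = diff
--
--     sorted_diff = sorted(differences.items(), key=lambda x: x[1])
--
--     closest_key = sorted_diff[0][0]
--     second_closest_key = sorted_diff[1][0]
--
--     return closest_key, second_closest_key
-- ===== SOURCE B (Python) =====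
-- coin_widths = {"2€": 129, "1€": 113, "50ct": 118, "20ct": 103, "10ct":95, "5ct": 97, "2ct": 90, "1ct": 80}
--
-- def find_closest_width(number):
--     best_key = best_diff = second_key = second_diff = None
--     for key, value in coin_widths.items():
--         diff = abs(number - value)
--         if best_diff is None or diff < best_diff:
--             second_key, second_diff = best_key, best_diff
--             best_key, best_diff = key, diff
--         elif second_diff is None or diff < second_diff:
--             second_key, second_diff = key, diff
--     return best_key, second_key
-- ===== Notes on version B (the rewrite author's own statement) =====
-- stated objective: simpler
-- what changed: Replaced building a differences dict plus a full stable sort with a single pass over coin_widths that tracks only the best and second-best coin (strict < keeps earlier dict entries on ties, matching sorted()'s stability).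
import Mathlib
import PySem

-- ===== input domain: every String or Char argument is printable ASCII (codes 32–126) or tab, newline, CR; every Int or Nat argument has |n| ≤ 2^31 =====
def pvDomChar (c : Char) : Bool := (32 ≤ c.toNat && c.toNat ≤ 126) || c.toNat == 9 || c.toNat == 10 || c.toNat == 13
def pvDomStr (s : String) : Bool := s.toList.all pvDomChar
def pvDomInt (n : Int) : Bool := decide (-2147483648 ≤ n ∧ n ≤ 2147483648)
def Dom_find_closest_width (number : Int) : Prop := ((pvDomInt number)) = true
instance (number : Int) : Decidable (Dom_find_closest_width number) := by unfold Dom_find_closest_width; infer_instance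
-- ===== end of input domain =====

-- B replaces the differences-dict + full stable sort with a single pass tracking the
-- best and second-best coin (simpler); same return value everywhere.

-- ===== PORT A =====
def coin_widths : PySem.Dict String Int :=
  PySem.Dict.ofList [("2€", 129), ("1€", 113), ("50ct", 118), ("20ct", 103),
                     ("10ct", 95), ("5ct", 97), ("2ct", 90), ("1ct", 80)]

def find_closest_width (number : Int) : String × String :=
  let differences :=
    coin_widths.items.foldl
      (fun (d : PySem.Dict String Int) kv => d.insert kv.1 |number - kv.2|)
      PySem.Dict.empty
  let sorted_diff := PySem.List.sorted differences.items (fun x => x.2) false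
  -- Python indexes [0] and [1]; the list always has 8 entries, so the defaults are unreachable
  let closest_key := ((PySem.List.pyGet? sorted_diff 0).map (·.1)).getD ""
  let second_closest_key := ((PySem.List.pyGet? sorted_diff 1).map (·.1)).getD ""
  (closest_key, second_closest_key)

-- ===== PORT B =====
def find_closest_width_alt (number : Int) : String × String :=
  let step := fun (st : Option (String × Int) × Option (String × Int)) (kv : String × Int) =>
    let diff := |number - kv.2|
    match st with
    | (none, s) => (some (kv.1, diff), s)
    | (some (bk, bd), s) =>
      if diff < bd then (some (kv.1, diff), some (bk, bd))
      else
        match s with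
        | none => (some (bk, bd), some (kv.1, diff))
        | some (sk, sd) =>
          if diff < sd then (some (bk, bd), some (kv.1, diff))
          else (some (bk, bd), some (sk, sd))
  let r := coin_widths.items.foldl step (none, none)
  ((r.1.map (·.1)).getD "", (r.2.map (·.1)).getD "")

-- ===== PRECONDITION & SPEC =====
def Spec_find_closest_width (number : Int) (out : String × String) : Prop := out = find_closest_width_alt number
instance (number : Int) (out : String × String) : Decidable (Spec_find_closest_width number out) := by unfold Spec_find_closest_width; infer_instance

-- ===== CLAIM (what is proved, stated in full; the proofs are below) =====
def Claim_equal_find_closest_width : Prop := ∀ (number : Int), Dom_find_closest_width number → Spec_find_closest_width number (find_closest_width number)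

-- ===== LEMMAS AND PROOFS =====

theorem low_A (n : Int) (h : n ≤ 80) : find_closest_width n = ("1ct", "2ct") := by
  have h1 : |n - 129| = 129 - n := by rw [abs_of_nonpos (by omega)]; ring
  have h2 : |n - 113| = 113 - n := by rw [abs_of_nonpos (by omega)]; ring
  have h3 : |n - 118| = 118 - n := by rw [abs_of_nonpos (by omega)]; ring
  have h4 : |n - 103| = 103 - n := by rw [abs_of_nonpos (by omega)]; ring
  have h5 : |n - 95| = 95 - n := by rw [abs_of_nonpos (by omega)]; ring
  have h6 : |n - 97| = 97 - n := by rw [abs_of_nonpos (by omega)]; ring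
  have h7 : |n - 90| = 90 - n := by rw [abs_of_nonpos (by omega)]; ring
  have h8 : |n - 80| = 80 - n := by rw [abs_of_nonpos (by omega)]; ring
  have hitems :
      (coin_widths.items.foldl
        (fun (d : PySem.Dict String Int) kv => d.insert kv.1 |n - kv.2|)
        PySem.Dict.empty).items
      = [("2€", |n - 129|), ("1€", |n - 113|), ("50ct", |n - 118|), ("20ct", |n - 103|),
         ("10ct", |n - 95|), ("5ct", |n - 97|), ("2ct", |n - 90|), ("1ct", |n - 80|)] := rfl
  show (_ , _) = _
  rw [hitems]
  simp [PySem.List.sorted, PySem.List.insertBy, h1, h2, h3, h4, h5, h6, h7, h8,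
    sub_lt_sub_iff_right, PySem.List.pyGet?, PySem.List.pyIdx?]

theorem low_B (n : Int) (h : n ≤ 80) : find_closest_width_alt n = ("1ct", "2ct") := by
  have h1 : |n - 129| = 129 - n := by rw [abs_of_nonpos (by omega)]; ring
  have h2 : |n - 113| = 113 - n := by rw [abs_of_nonpos (by omega)]; ring
  have h3 : |n - 118| = 118 - n := by rw [abs_of_nonpos (by omega)]; ring
  have h4 : |n - 103| = 103 - n := by rw [abs_of_nonpos (by omega)]; ring
  have h5 : |n - 95| = 95 - n := by rw [abs_of_nonpos (by omega)]; ring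
  have h6 : |n - 97| = 97 - n := by rw [abs_of_nonpos (by omega)]; ring
  have h7 : |n - 90| = 90 - n := by rw [abs_of_nonpos (by omega)]; ring
  have h8 : |n - 80| = 80 - n := by rw [abs_of_nonpos (by omega)]; ring
  have hitems : coin_widths.items
      = [("2€", 129), ("1€", 113), ("50ct", 118), ("20ct", 103),
         ("10ct", 95), ("5ct", 97), ("2ct", 90), ("1ct", 80)] := rfl
  show (_ , _) = _
  rw [hitems]
  simp only [List.foldl, h1, h2, h3, h4, h5, h6, h7, h8]
  norm_num [sub_lt_sub_iff_right]

theorem high_A (n : Int) (h : 129 ≤ n) : find_closest_width n = ("2€", "50ct") := by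
  have h1 : |n - 129| = n - 129 := abs_of_nonneg (by omega)
  have h2 : |n - 113| = n - 113 := abs_of_nonneg (by omega)
  have h3 : |n - 118| = n - 118 := abs_of_nonneg (by omega)
  have h4 : |n - 103| = n - 103 := abs_of_nonneg (by omega)
  have h5 : |n - 95| = n - 95 := abs_of_nonneg (by omega)
  have h6 : |n - 97| = n - 97 := abs_of_nonneg (by omega)
  have h7 : |n - 90| = n - 90 := abs_of_nonneg (by omega)
  have h8 : |n - 80| = n - 80 := abs_of_nonneg (by omega)
  have hitems :
      (coin_widths.items.foldl
        (fun (d : PySem.Dict String Int) kv => d.insert kv.1 |n - kv.2|)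
        PySem.Dict.empty).items
      = [("2€", |n - 129|), ("1€", |n - 113|), ("50ct", |n - 118|), ("20ct", |n - 103|),
         ("10ct", |n - 95|), ("5ct", |n - 97|), ("2ct", |n - 90|), ("1ct", |n - 80|)] := rfl
  show (_ , _) = _
  rw [hitems]
  simp [PySem.List.sorted, PySem.List.insertBy, h1, h2, h3, h4, h5, h6, h7, h8,
    sub_lt_sub_iff_left, PySem.List.pyGet?, PySem.List.pyIdx?]

theorem high_B (n : Int) (h : 129 ≤ n) : find_closest_width_alt n = ("2€", "50ct") := by
  have h1 : |n - 129| = n - 129 := abs_of_nonneg (by omega)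
  have h2 : |n - 113| = n - 113 := abs_of_nonneg (by omega)
  have h3 : |n - 118| = n - 118 := abs_of_nonneg (by omega)
  have h4 : |n - 103| = n - 103 := abs_of_nonneg (by omega)
  have h5 : |n - 95| = n - 95 := abs_of_nonneg (by omega)
  have h6 : |n - 97| = n - 97 := abs_of_nonneg (by omega)
  have h7 : |n - 90| = n - 90 := abs_of_nonneg (by omega)
  have h8 : |n - 80| = n - 80 := abs_of_nonneg (by omega)
  have hitems : coin_widths.items
      = [("2€", 129), ("1€", 113), ("50ct", 118), ("20ct", 103),
         ("10ct", 95), ("5ct", 97), ("2ct", 90), ("1ct", 80)] := rfl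
  show (_ , _) = _
  rw [hitems]
  simp only [List.foldl, h1, h2, h3, h4, h5, h6, h7, h8]
  norm_num [sub_lt_sub_iff_left]

set_option maxHeartbeats 2000000 in
theorem mid_eq (n : Int) (hlo : 80 < n) (hhi : n < 129) :
    find_closest_width n = find_closest_width_alt n := by
  interval_cases n <;> decide

-- ===== VERDICT (by name: the statement is the Claim_ definition above) =====
theorem find_closest_width_spec : Claim_equal_find_closest_width := by
  intro n _
  unfold Spec_find_closest_width
  by_cases h : n ≤ 80
  · rw [low_A n h, low_B n h]
  · by_cases h' : 129 ≤ n
    · rw [high_A n h', high_B n h']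
    · exact mid_eq n (by omega) (by omega)
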